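-- pv_equiv track=rewrite | github.com/JeongGod/Algo-study | JeongGod/13week/baekjoon/15898.py | solution
-- ===== SOURCE A (Python) =====
-- from itertools import permutations
--
-- def insert_board(picks : list[tuple[list[list[int]], list[list[str]]]], pos : list[tuple[int, int]]) -> list[list[int]]:
--     score_board = [[0] * 5 for _ in range(5)]
--     color_board = [["W"] * 5 for _ in range(5)]
--     # gx -> gy -> gz순으로 넣는다.
--     for idx in range(3):
--         score_cur = picks[idx][0]
--         color_cur = picks[idx][1]
--         sx, sy = pos[idx]
--         for i in range(4):
--             for j in range(4):
--                 score_board[sx+i][sy+j] += score_cur[i][j]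
--                 if score_board[sx+i][sy+j] > 9:
--                     score_board[sx+i][sy+j] = 9
--                 elif score_board[sx+i][sy+j] < 0:
--                     score_board[sx+i][sy+j] = 0
--                 if color_cur[i][j] == "W":
--                     continue
--                 color_board[sx+i][sy+j] = color_cur[i][j]
--
--     return score_board, color_board
--
-- def calc(sboard : list[list[int]], cboard : list[list[str]]) -> int:
--     result = 0
--     for i in range(5):
--         for j in range(5):
--             if cboard[i][j] == "R":
--                 result += (7 * sboard[i][j])
--             elif cboard[i][j] == "B":
--                 result += (5 * sboard[i][j])
--             elif cboard[i][j] == "G":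
--                 result += (3 * sboard[i][j])
--             elif cboard[i][j] == "Y":
--                 result += (2 * sboard[i][j])
--     return result
--
-- def solution(n : int, ingredient : dict):
--     orders = []
--     position = [(0, 0), (0, 1), (1, 0), (1, 1)]
--     answer = 0
--     # 재료를 선택한다.
--     for per in permutations(range(n), 3):
--         orders.append(per)
--     # 해당 재료들을 넣는다.
--     for x, y, z in orders:
--         # 어떠한 회전 재료를 담을지 뽑는다.
--         for i in range(4):
--             for j in range(4):
--                 for k in range(4):
--                     picks = [ingredient[x][i], ingredient[y][j], ingredient[z][k]]
--                     # 어느 지점에다가 재료를 넣을지 선택한다.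
--                     for sx in range(4):
--                         for sy in range(4):
--                             for sz in range(4):
--                                 picks_pos = [position[sx], position[sy], position[sz]]
--                                 sboard, cboard = insert_board(picks, picks_pos)
--                                 answer = max(answer, calc(sboard, cboard))
--
--         # insert_board[gradient[x][0], gradient[y][0], gradient[z][0]]
--     return answer
-- ===== SOURCE B (Python) =====
-- from itertools import permutations
--
-- # Incremental board building: the layer-1 and layer-2 partial boards are built once
-- # per (ingredient, rotation, position) prefix and reused, instead of rebuilding all
-- # three layers from scratch in the innermost loop.
--
-- def solution(n, ingredient):
--     position = [(0, 0), (0, 1), (1, 0), (1, 1)]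
--
--     def apply_layer(boards, pick, pos):
--         sboard = [row[:] for row in boards[0]]
--         cboard = [row[:] for row in boards[1]]
--         score_cur, color_cur = pick
--         sx, sy = pos
--         for i in range(4):
--             for j in range(4):
--                 v = sboard[sx + i][sy + j] + score_cur[i][j]
--                 if v > 9:
--                     v = 9
--                 elif v < 0:
--                     v = 0
--                 sboard[sx + i][sy + j] = v
--                 c = color_cur[i][j]
--                 if c != "W":
--                     cboard[sx + i][sy + j] = c
--         return sboard, cboard
--
--     def score(boards):
--         sboard, cboard = boards
--         weight = {"R": 7, "B": 5, "G": 3, "Y": 2}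
--         s = 0
--         for r in range(5):
--             for c in range(5):
--                 s += weight.get(cboard[r][c], 0) * sboard[r][c]
--         return s
--
--     empty = ([[0] * 5 for _ in range(5)], [["W"] * 5 for _ in range(5)])
--     answer = 0
--     for x, y, z in permutations(range(n), 3):
--         gx, gy, gz = ingredient[x], ingredient[y], ingredient[z]
--         for i in range(4):
--             b1 = [apply_layer(empty, gx[i], position[sx]) for sx in range(4)]
--             for j in range(4):
--                 b2 = [[apply_layer(b1[sx], gy[j], position[sy]) for sy in range(4)]
--                       for sx in range(4)]
--                 for k in range(4):
--                     for sx in range(4):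
--                         for sy in range(4):
--                             for sz in range(4):
--                                 s = score(apply_layer(b2[sx][sy], gz[k], position[sz]))
--                                 if s > answer:
--                                     answer = s
--     return answer
-- ===== Notes on version B (the rewrite author's own statement) =====
-- stated objective: alternative
-- what changed: B builds the board incrementally: layer-1 and layer-2 partial boards are computed once per (ingredient, rotation, position) prefix and snapshotted for reuse, so the innermost loop applies only the third layer and scores, instead of calling insert_board which rebuilds all three layers from an empty board for every position triple; scoring uses a colour-weight table instead of the if/elif chain.
import Mathlib
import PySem

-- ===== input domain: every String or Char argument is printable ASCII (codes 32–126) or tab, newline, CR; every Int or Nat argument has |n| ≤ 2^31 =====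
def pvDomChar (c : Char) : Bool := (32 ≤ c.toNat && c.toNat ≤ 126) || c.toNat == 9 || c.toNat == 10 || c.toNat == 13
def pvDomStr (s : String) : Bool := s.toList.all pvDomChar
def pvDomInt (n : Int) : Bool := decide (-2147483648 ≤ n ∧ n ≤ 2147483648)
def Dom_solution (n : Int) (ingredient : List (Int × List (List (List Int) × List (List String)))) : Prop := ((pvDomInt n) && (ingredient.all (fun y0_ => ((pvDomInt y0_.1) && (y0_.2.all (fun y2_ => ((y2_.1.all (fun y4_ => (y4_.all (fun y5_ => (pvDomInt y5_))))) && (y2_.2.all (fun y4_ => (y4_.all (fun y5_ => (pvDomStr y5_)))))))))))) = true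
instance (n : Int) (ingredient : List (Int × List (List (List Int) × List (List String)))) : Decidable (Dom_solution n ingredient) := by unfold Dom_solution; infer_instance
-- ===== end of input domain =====

-- B hoists the layer-1 and layer-2 partial boards out of the inner loops (incremental
-- snapshots) instead of rebuilding all three layers per innermost position triple
-- (same asymptotics, less work per innermost iteration).

-- ===== PORT A =====
-- shared small helpers (board cell access, the Python dict lookup, permutations list)
def emptyScore : List (List Int) := List.replicate 5 (List.replicate 5 0)
def emptyColor : List (List String) := List.replicate 5 (List.replicate 5 "W")
def posList : List (Nat × Nat) := [(0,0), (0,1), (1,0), (1,1)]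
def getPos (s : Nat) : Nat × Nat := posList.getD s (0,0)
def get2I (b : List (List Int)) (i j : Nat) : Int := (b.getD i []).getD j 0
def get2S (b : List (List String)) (i j : Nat) : String := (b.getD i []).getD j ""
def set2I (b : List (List Int)) (i j : Nat) (v : Int) : List (List Int) :=
  b.set i ((b.getD i []).set j v)
def set2S (b : List (List String)) (i j : Nat) (v : String) : List (List String) :=
  b.set i ((b.getD i []).set j v)
-- ingredient[x]: Python dict lookup (first match in the association list); the default []
-- is only reached outside Pre_solution (Python raises KeyError there)
def getIng (ingredient : List (Int × List (List (List Int) × List (List String)))) (x : Int) :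
    List (List (List Int) × List (List String)) :=
  (List.lookup x ingredient).getD []
def pickD : (List (List Int)) × (List (List String)) := ([], [])

-- insert_board: for idx in range(3) place picks[idx] at pos[idx]; Python's in-place
-- 'sboard[x][y] += …; then clamp by re-assigning' becomes set-then-conditionally-set
def insert_board (picks : List ((List (List Int)) × (List (List String))))
    (pos : List (Nat × Nat)) : (List (List Int)) × (List (List String)) :=
  (List.range 3).foldl (fun st idx =>
    let pick := picks.getD idx pickD
    let p := pos.getD idx (0,0)
    (List.range 4).foldl (fun st i =>
      (List.range 4).foldl (fun st j =>
        let s0 := get2I st.1 (p.1 + i) (p.2 + j) + get2I pick.1 i j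
        let sb1 := set2I st.1 (p.1 + i) (p.2 + j) s0
        let sb2 := if s0 > 9 then set2I sb1 (p.1 + i) (p.2 + j) 9
                   else if s0 < 0 then set2I sb1 (p.1 + i) (p.2 + j) 0
                   else sb1
        let c := get2S pick.2 i j
        (sb2, if c = "W" then st.2 else set2S st.2 (p.1 + i) (p.2 + j) c)) st) st)
    (emptyScore, emptyColor)

def calcScore (sboard : List (List Int)) (cboard : List (List String)) : Int :=
  (List.range 5).foldl (fun result i =>
    (List.range 5).foldl (fun result j =>
      let c := get2S cboard i j
      if c = "R" then result + 7 * get2I sboard i j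
      else if c = "B" then result + 5 * get2I sboard i j
      else if c = "G" then result + 3 * get2I sboard i j
      else if c = "Y" then result + 2 * get2I sboard i j
      else result) result) 0

def solution (n : Int) (ingredient : List (Int × List (List (List Int) × List (List String)))) : Int :=
  let orders := PySem.List.permutations ((List.range n.toNat).map (fun m => (m : Int))) 3
  orders.foldl (fun answer per =>
    let x := per.getD 0 0
    let y := per.getD 1 0
    let z := per.getD 2 0
    (List.range 4).foldl (fun answer i =>
      (List.range 4).foldl (fun answer j =>
        (List.range 4).foldl (fun answer k =>
          let picks := [(getIng ingredient x).getD i pickD,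
                        (getIng ingredient y).getD j pickD,
                        (getIng ingredient z).getD k pickD]
          (List.range 4).foldl (fun answer sx =>
            (List.range 4).foldl (fun answer sy =>
              (List.range 4).foldl (fun answer sz =>
                let picks_pos := [getPos sx, getPos sy, getPos sz]
                let bc := insert_board picks picks_pos
                max answer (calcScore bc.1 bc.2)) answer) answer) answer) answer) answer) answer) 0

-- ===== PORT B =====
-- apply a single 4×4 layer onto a copy of the boards (clamp computed before the write)
def applyLayer (boards : (List (List Int)) × (List (List String)))
    (pick : (List (List Int)) × (List (List String))) (pos : Nat × Nat) :
    (List (List Int)) × (List (List String)) :=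
  (List.range 4).foldl (fun st i =>
    (List.range 4).foldl (fun st j =>
      let v := get2I st.1 (pos.1 + i) (pos.2 + j) + get2I pick.1 i j
      let v := if v > 9 then (9 : Int) else if v < 0 then 0 else v
      let c := get2S pick.2 i j
      (set2I st.1 (pos.1 + i) (pos.2 + j) v,
       if c ≠ "W" then set2S st.2 (pos.1 + i) (pos.2 + j) c else st.2)) st) boards

def weightOf (c : String) : Int :=
  (List.lookup c [("R", (7 : Int)), ("B", 5), ("G", 3), ("Y", 2)]).getD 0

def scoreB (boards : (List (List Int)) × (List (List String))) : Int :=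
  (List.range 5).foldl (fun s r =>
    (List.range 5).foldl (fun s c =>
      s + weightOf (get2S boards.2 r c) * get2I boards.1 r c) s) 0

def solution_alt (n : Int) (ingredient : List (Int × List (List (List Int) × List (List String)))) : Int :=
  (PySem.List.permutations ((List.range n.toNat).map (fun m => (m : Int))) 3).foldl
    (fun answer per =>
      let x := per.getD 0 0
      let y := per.getD 1 0
      let z := per.getD 2 0
      let gx := getIng ingredient x
      let gy := getIng ingredient y
      let gz := getIng ingredient z
      (List.range 4).foldl (fun answer i =>
        let b1 := (List.range 4).map (fun sx =>
          applyLayer (emptyScore, emptyColor) (gx.getD i pickD) (getPos sx))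
        (List.range 4).foldl (fun answer j =>
          let b2 := (List.range 4).map (fun sx =>
            (List.range 4).map (fun sy =>
              applyLayer (b1.getD sx (emptyScore, emptyColor)) (gy.getD j pickD) (getPos sy)))
          (List.range 4).foldl (fun answer k =>
            (List.range 4).foldl (fun answer sx =>
              (List.range 4).foldl (fun answer sy =>
                (List.range 4).foldl (fun answer sz =>
                  let s := scoreB (applyLayer ((b2.getD sx []).getD sy (emptyScore, emptyColor))
                                    (gz.getD k pickD) (getPos sz))
                  if s > answer then s else answer) answer) answer) answer) answer) answer) answer) 0

-- ===== PRECONDITION & SPEC =====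
-- Pre_solution = exactly the inputs on which Python A returns normally: when n ≥ 3 every
-- key 0..n-1 must be present in the dict (else KeyError) with at least 4 rotations whose
-- first four score/color grids have at least 4 rows of at least 4 entries (else IndexError).
def okGridI (g : List (List Int)) : Prop := 4 ≤ g.length ∧ ∀ r ∈ g.take 4, 4 ≤ r.length
def okGridS (g : List (List String)) : Prop := 4 ≤ g.length ∧ ∀ r ∈ g.take 4, 4 ≤ r.length
def okVal (v : List ((List (List Int)) × (List (List String)))) : Prop :=
  4 ≤ v.length ∧ ∀ p ∈ v.take 4, okGridI p.1 ∧ okGridS p.2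
def Pre_solution (n : Int) (ingredient : List (Int × List (List (List Int) × List (List String)))) : Prop :=
  3 ≤ n → n.toNat ≤ ingredient.length ∧
    ∀ m ∈ List.range n.toNat, okVal (getIng ingredient (m : Int))
instance (n : Int) (ingredient : List (Int × List (List (List Int) × List (List String)))) : Decidable (Pre_solution n ingredient) := by
  unfold Pre_solution okVal okGridI okGridS; infer_instance
def pvWitness_solution : Int × (List (Int × List (List (List Int) × List (List String)))) := (2, [])

def Spec_solution (n : Int) (ingredient : List (Int × List (List (List Int) × List (List String)))) (out : Int) : Prop := out = solution_alt n ingredient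
instance (n : Int) (ingredient : List (Int × List (List (List Int) × List (List String)))) (out : Int) : Decidable (Spec_solution n ingredient out) := by unfold Spec_solution; infer_instance

-- ===== CLAIM (what is proved, stated in full; the proofs are below) =====
def Claim_equal_solution : Prop := ∀ (n : Int) (ingredient : List (Int × List (List (List Int) × List (List String)))), Dom_solution n ingredient → Pre_solution n ingredient → Spec_solution n ingredient (solution n ingredient)

-- ===== LEMMAS AND PROOFS =====

-- A's inner double loop over one layer, as a named function (proof-only helper)
def layerA (st : (List (List Int)) × (List (List String)))
    (pick : (List (List Int)) × (List (List String))) (p : Nat × Nat) :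
    (List (List Int)) × (List (List String)) :=
  (List.range 4).foldl (fun st i =>
    (List.range 4).foldl (fun st j =>
      let s0 := get2I st.1 (p.1 + i) (p.2 + j) + get2I pick.1 i j
      let sb1 := set2I st.1 (p.1 + i) (p.2 + j) s0
      let sb2 := if s0 > 9 then set2I sb1 (p.1 + i) (p.2 + j) 9
                 else if s0 < 0 then set2I sb1 (p.1 + i) (p.2 + j) 0
                 else sb1
      let c := get2S pick.2 i j
      (sb2, if c = "W" then st.2 else set2S st.2 (p.1 + i) (p.2 + j) c)) st) st

theorem insert_board_unfold (picks : List ((List (List Int)) × (List (List String))))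
    (pos : List (Nat × Nat)) :
    insert_board picks pos =
      layerA (layerA (layerA (emptyScore, emptyColor)
        (picks.getD 0 pickD) (pos.getD 0 (0,0)))
        (picks.getD 1 pickD) (pos.getD 1 (0,0)))
        (picks.getD 2 pickD) (pos.getD 2 (0,0)) := by
  unfold insert_board
  rw [show List.range 3 = [0, 1, 2] from rfl]
  simp only [List.foldl_cons, List.foldl_nil]
  rfl

theorem length_set2I (b : List (List Int)) (i j : Nat) (v : Int) :
    (set2I b i j v).length = b.length := by
  simp [set2I]

theorem set2I_set2I (b : List (List Int)) (i j : Nat) (v w : Int) (h : i < b.length) :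
    set2I (set2I b i j v) i j w = set2I b i j w := by
  unfold set2I
  have hrow : (b.set i ((b.getD i []).set j v)).getD i [] = (b.getD i []).set j v := by
    rw [List.getD_eq_getElem?_getD]; simp [h]
  rw [List.set_set, hrow, List.set_set]

-- folding two congruent step functions while an invariant is maintained
theorem foldl_eq_of_inv {α σ : Type} (P : σ → Prop) (f g : σ → α → σ) (l : List α)
    (hstep : ∀ s a, a ∈ l → P s → f s a = g s a ∧ P (g s a)) :
    ∀ s, P s → List.foldl f s l = List.foldl g s l ∧ P (List.foldl g s l) := by
  induction l with
  | nil => intro s hs; exact ⟨rfl, hs⟩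
  | cons a t ih =>
    intro s hs
    obtain ⟨heq, hP⟩ := hstep s a (List.mem_cons_self) hs
    simp only [List.foldl_cons, heq]
    exact ih (fun s a ha hP' => hstep s a (List.mem_cons_of_mem _ ha) hP') _ hP

theorem getPos_fst_le (s : Nat) : (getPos s).1 ≤ 1 ∧ (getPos s).2 ≤ 1 := by
  unfold getPos posList
  rcases s with _ | _ | _ | _ | s <;> simp [List.getD]

theorem layerA_eq_applyLayer (st : (List (List Int)) × (List (List String)))
    (pick : (List (List Int)) × (List (List String))) (s : Nat)
    (hlen : st.1.length = 5) :
    layerA st pick (getPos s) = applyLayer st pick (getPos s) ∧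
      (applyLayer st pick (getPos s)).1.length = 5 := by
  obtain ⟨h1, h2⟩ := getPos_fst_le s
  unfold layerA applyLayer
  refine foldl_eq_of_inv (fun st => st.1.length = 5) _ _ _ ?_ st hlen
  intro s1 i hi h5
  have hi4 : i < 4 := List.mem_range.mp hi
  refine foldl_eq_of_inv (fun st => st.1.length = 5) _ _ _ ?_ s1 h5
  intro s2 j hj h5'
  have hj4 : j < 4 := List.mem_range.mp hj
  have hx : (getPos s).1 + i < s2.1.length := by omega
  constructor
  · simp only []
    congr 1
    · split_ifs with hgt hlt
      · rw [set2I_set2I _ _ _ _ _ hx]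
      · rw [set2I_set2I _ _ _ _ _ hx]
      · rfl
    · by_cases hc : get2S pick.2 i j = "W" <;> simp [hc]
  · simp only [length_set2I]; exact h5'

theorem calcScore_eq_scoreB (bd : (List (List Int)) × (List (List String))) :
    calcScore bd.1 bd.2 = scoreB bd := by
  unfold calcScore scoreB
  refine PySem.List.foldl_congr_mem _ _ _ _ ?_
  intro acc i _
  refine PySem.List.foldl_congr_mem _ _ _ _ ?_
  intro acc' j _
  by_cases h1 : get2S bd.2 i j = "R"
  · simp [weightOf, List.lookup, h1]
  · by_cases h2 : get2S bd.2 i j = "B"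
    · simp [weightOf, List.lookup, h2]
    · by_cases h3 : get2S bd.2 i j = "G"
      · simp [weightOf, List.lookup, h3]
      · by_cases h4 : get2S bd.2 i j = "Y"
        · simp [weightOf, List.lookup, h4]
        · simp [weightOf, List.lookup, h1, h2, h3, h4, beq_eq_false_iff_ne.mpr h1,
                beq_eq_false_iff_ne.mpr h2, beq_eq_false_iff_ne.mpr h3, beq_eq_false_iff_ne.mpr h4]

theorem emptyScore_length : emptyScore.length = 5 := by simp [emptyScore]

-- ===== VERDICT (by name: the statement is the Claim_ definition above) =====
theorem solution_spec : Claim_equal_solution := by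
  intro n ingredient _hdom _hpre
  unfold Spec_solution solution solution_alt
  refine PySem.List.foldl_congr_mem _ _ _ _ ?_
  intro answer per _
  refine PySem.List.foldl_congr_mem _ _ _ _ ?_
  intro answer1 i _
  refine PySem.List.foldl_congr_mem _ _ _ _ ?_
  intro answer2 j _
  refine PySem.List.foldl_congr_mem _ _ _ _ ?_
  intro answer3 k _
  refine PySem.List.foldl_congr_mem _ _ _ _ ?_
  intro answer4 sx hsx
  have hsx4 : sx < 4 := List.mem_range.mp hsx
  refine PySem.List.foldl_congr_mem _ _ _ _ ?_
  intro answer5 sy hsy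
  have hsy4 : sy < 4 := List.mem_range.mp hsy
  refine PySem.List.foldl_congr_mem _ _ _ _ ?_
  intro answer6 sz _
  -- name the three picks
  set p1 := (getIng ingredient (per.getD 0 0)).getD i pickD with hp1
  set p2 := (getIng ingredient (per.getD 1 0)).getD j pickD with hp2
  set p3 := (getIng ingredient (per.getD 2 0)).getD k pickD with hp3
  -- reduce B's precomputed snapshots
  rw [PySem.List.getD_map_range _ 4 sx _ hsx4, PySem.List.getD_map_range _ 4 sx _ hsx4,
      PySem.List.getD_map_range _ 4 sy _ hsy4]
  -- equate A's insert_board with B's three chained applyLayer calls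
  have e0 : (emptyScore, emptyColor).1.length = 5 := emptyScore_length
  have l1 := layerA_eq_applyLayer (emptyScore, emptyColor) p1 sx e0
  have l2 := layerA_eq_applyLayer (applyLayer (emptyScore, emptyColor) p1 (getPos sx)) p2 sy l1.2
  have l3 := layerA_eq_applyLayer
    (applyLayer (applyLayer (emptyScore, emptyColor) p1 (getPos sx)) p2 (getPos sy)) p3 sz l2.2
  have hib : insert_board [p1, p2, p3] [getPos sx, getPos sy, getPos sz] =
      applyLayer (applyLayer (applyLayer (emptyScore, emptyColor) p1 (getPos sx))
        p2 (getPos sy)) p3 (getPos sz) := by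
    rw [insert_board_unfold]
    simp only [List.getD, List.getElem?_cons_zero, List.getElem?_cons_succ, Option.getD_some]
    rw [l1.1, l2.1, l3.1]
  simp only [hib, calcScore_eq_scoreB]
  split_ifs with h <;> omega
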